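-- pv_equiv track=rewrite | github.com/h2r/Task-Scoping | misc/underestimate_state_space_hardcoded.py | underestimate_state_space
-- ===== SOURCE A (Python) =====
-- from functools import reduce
-- import operator as op
--
-- def ncr(n, r):
--     # https://stackoverflow.com/a/4941932
--     r = min(r, n-r)
--     numer = reduce(op.mul, range(n, n-r, -1), 1)
--     denom = reduce(op.mul, range(1, r+1), 1)
--     return numer // denom  # or / in Python 2
--
-- def underestimate_state_space(x_min, x_max, y_min, y_max, z_min, z_max, n_obsidian_total, item_counts):
--     """
--     Underestimate state space
--     Sources of underestimation:
--         When asigning item locations, assume all obsidian blocks are present (easy to correct)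
--         Assume that all items that are not present are in the agent's inventory (harder to correct)
--         Assume the agent is alive
--     """
--     n_locations = (x_max - x_min + 1) * (y_max - y_min + 1) * (z_max - z_min + 1)
--     obsidian_states = 0
--     # Choose how many obsidians are present
--     for n_obsidian_present in range(n_obsidian_total):
--         # Choose which obsidian are present (unordered)
--         which_obsidian = ncr(n_obsidian_total, n_obsidian_present)
--         # Choose obsidian locations (ordered)
--         obsidian_placements = 1
--         for i in range(n_obsidian_present):
--             obsidian_placements *= (n_locations - i)
--         obsidian_states += obsidian_placements * which_obsidian
--
--     # Items
--     item_states = 1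
--     # Iterate over item types
--     for this_item_type_total in  item_counts:
--         if this_item_type_total == 0: continue
--         # Choose a lower-bound for the locations items can be in by assuming all obsidian is present
--         n_available_locations = n_locations - n_obsidian_total
--         states_this_item_type = 0
--         # Choose how many of these items are present
--         for n_item_present in range(this_item_type_total):
--             # Choose which items are present
--             which_items = ncr(this_item_type_total, n_item_present)
--             item_placements = 1
--             # Choose item locations. Items can be in any location not occupied by a block
--             for i in range(n_item_present):
--                 # items can be in the same location
--                 item_placements *= n_available_locations
--             states_this_item_type += which_items * item_placements
--         item_states *= states_this_item_type
--
--     agent_states = n_locations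
--     total_states = obsidian_states * item_states * agent_states
--     return total_states
-- ===== SOURCE B (Python) =====
-- def underestimate_state_space(x_min, x_max, y_min, y_max, z_min, z_max, n_obsidian_total, item_counts):
--     n_locations = (x_max - x_min + 1) * (y_max - y_min + 1) * (z_max - z_min + 1)
--     # Obsidian: one pass over k, updating the binomial coefficient C(N, k) and
--     # the falling-factorial placement product incrementally instead of
--     # recomputing both from scratch at every k.
--     obsidian_states = 0
--     binom = 1       # C(n_obsidian_total, k)
--     placements = 1  # n_locations * (n_locations - 1) * ... * (n_locations - k + 1)
--     for k in range(n_obsidian_total):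
--         obsidian_states += binom * placements
--         placements *= n_locations - k
--         binom = binom * (n_obsidian_total - k) // (k + 1)
--     # Items: the same incremental technique per item type, maintaining C(c, k)
--     # and the power a**k as running values.
--     a = n_locations - n_obsidian_total
--     item_states = 1
--     for c in item_counts:
--         if c == 0:
--             continue
--         s = 0
--         binom = 1  # C(c, k)
--         power = 1  # a**k
--         for k in range(c):
--             s += binom * power
--             power *= a
--             binom = binom * (c - k) // (k + 1)
--         item_states *= s
--     return obsidian_states * item_states * n_locations
-- ===== Notes on version B (the rewrite author's own statement) =====
-- stated objective: faster
-- what changed: Both the obsidian loop and each item-type loop update the binomial coefficient and the placement product/power incrementally in a single pass, instead of recomputing C(n,k) via reduce-products and the placement product by a fresh inner loop at every iteration.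
import Mathlib
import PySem

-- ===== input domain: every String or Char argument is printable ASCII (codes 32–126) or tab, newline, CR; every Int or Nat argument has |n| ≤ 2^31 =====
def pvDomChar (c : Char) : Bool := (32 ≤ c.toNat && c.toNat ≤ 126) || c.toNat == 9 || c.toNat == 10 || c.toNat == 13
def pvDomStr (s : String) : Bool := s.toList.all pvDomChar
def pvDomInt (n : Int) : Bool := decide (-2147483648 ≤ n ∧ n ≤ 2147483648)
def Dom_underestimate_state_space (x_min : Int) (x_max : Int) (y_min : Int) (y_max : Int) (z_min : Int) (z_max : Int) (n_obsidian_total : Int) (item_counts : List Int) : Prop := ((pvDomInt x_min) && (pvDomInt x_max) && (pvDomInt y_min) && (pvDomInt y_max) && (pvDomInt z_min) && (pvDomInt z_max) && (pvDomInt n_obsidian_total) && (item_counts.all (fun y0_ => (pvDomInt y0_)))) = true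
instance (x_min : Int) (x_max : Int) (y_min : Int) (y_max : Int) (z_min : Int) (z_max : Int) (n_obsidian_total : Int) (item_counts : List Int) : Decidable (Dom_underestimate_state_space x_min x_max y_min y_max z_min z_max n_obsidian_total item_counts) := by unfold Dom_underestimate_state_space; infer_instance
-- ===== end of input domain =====

-- B maintains the binomial coefficient and the placement product/power incrementally in each
-- loop instead of recomputing them per iteration (objective: faster; measured).

-- ===== PORT A =====
-- Port of A's helper ncr (reduce-based binomial coefficient).
def ncr (n r : Int) : Int :=
  let r' := min r (n - r)
  let numer := (PySem.List.pyRange n (n - r') (-1)).foldl (· * ·) 1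
  let denom := (PySem.List.pyRange 1 (r' + 1) 1).foldl (· * ·) 1
  PySem.Int.floordiv numer denom

def underestimate_state_space (x_min : Int) (x_max : Int) (y_min : Int) (y_max : Int) (z_min : Int) (z_max : Int) (n_obsidian_total : Int) (item_counts : List Int) : Int :=
  let n_locations := (x_max - x_min + 1) * (y_max - y_min + 1) * (z_max - z_min + 1)
  let obsidian_states := (PySem.List.pyRange 0 n_obsidian_total 1).foldl
    (fun acc n_obsidian_present =>
      let which_obsidian := ncr n_obsidian_total n_obsidian_present
      let obsidian_placements := (PySem.List.pyRange 0 n_obsidian_present 1).foldl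
        (fun p i => p * (n_locations - i)) 1
      acc + obsidian_placements * which_obsidian) 0
  let item_states := item_counts.foldl
    (fun st this_item_type_total =>
      if this_item_type_total = 0 then st
      else
        let n_available_locations := n_locations - n_obsidian_total
        let states_this_item_type := (PySem.List.pyRange 0 this_item_type_total 1).foldl
          (fun acc n_item_present =>
            let which_items := ncr this_item_type_total n_item_present
            let item_placements := (PySem.List.pyRange 0 n_item_present 1).foldl
              (fun p _ => p * n_available_locations) 1
            acc + which_items * item_placements) 0
        st * states_this_item_type) 1
  let agent_states := n_locations
  obsidian_states * item_states * agent_states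

-- ===== PORT B =====
-- B: each loop is one pass maintaining (running sum, running binomial coefficient, running product/power).
def underestimate_state_space_alt (x_min : Int) (x_max : Int) (y_min : Int) (y_max : Int) (z_min : Int) (z_max : Int) (n_obsidian_total : Int) (item_counts : List Int) : Int :=
  let n_locations := (x_max - x_min + 1) * (y_max - y_min + 1) * (z_max - z_min + 1)
  let st := (PySem.List.pyRange 0 n_obsidian_total 1).foldl
    (fun (s : Int × Int × Int) k =>
      (s.1 + s.2.1 * s.2.2,
       PySem.Int.floordiv (s.2.1 * (n_obsidian_total - k)) (k + 1),
       s.2.2 * (n_locations - k))) (0, 1, 1)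
  let obsidian_states := st.1
  let a := n_locations - n_obsidian_total
  let item_states := item_counts.foldl
    (fun acc c =>
      if c = 0 then acc
      else
        let t := (PySem.List.pyRange 0 c 1).foldl
          (fun (s : Int × Int × Int) k =>
            (s.1 + s.2.1 * s.2.2,
             PySem.Int.floordiv (s.2.1 * (c - k)) (k + 1),
             s.2.2 * a)) (0, 1, 1)
        acc * t.1) 1
  obsidian_states * item_states * n_locations

-- ===== PRECONDITION & SPEC =====
def Spec_underestimate_state_space (x_min : Int) (x_max : Int) (y_min : Int) (y_max : Int) (z_min : Int) (z_max : Int) (n_obsidian_total : Int) (item_counts : List Int) (out : Int) : Prop := out = underestimate_state_space_alt x_min x_max y_min y_max z_min z_max n_obsidian_total item_counts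
instance (x_min : Int) (x_max : Int) (y_min : Int) (y_max : Int) (z_min : Int) (z_max : Int) (n_obsidian_total : Int) (item_counts : List Int) (out : Int) : Decidable (Spec_underestimate_state_space x_min x_max y_min y_max z_min z_max n_obsidian_total item_counts out) := by unfold Spec_underestimate_state_space; infer_instance

-- ===== CLAIM (what is proved, stated in full; the proofs are below) =====
def Claim_equal_underestimate_state_space : Prop := ∀ (x_min : Int) (x_max : Int) (y_min : Int) (y_max : Int) (z_min : Int) (z_max : Int) (n_obsidian_total : Int) (item_counts : List Int), Dom_underestimate_state_space x_min x_max y_min y_max z_min z_max n_obsidian_total item_counts → Spec_underestimate_state_space x_min x_max y_min y_max z_min z_max n_obsidian_total item_counts (underestimate_state_space x_min x_max y_min y_max z_min z_max n_obsidian_total item_counts)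

-- ===== LEMMAS AND PROOFS =====

-- foldl of repeated multiplication over List.range is a Finset product
theorem pvFoldlMulRange (g : Nat → Int) (n : Nat) (init : Int) :
    (List.range n).foldl (fun p k => p * g k) init = init * ∏ i ∈ Finset.range n, g i := by
  induction n with
  | zero => simp
  | succ n ih =>
    rw [List.range_succ, List.foldl_append, ih, Finset.prod_range_succ]
    simp [mul_assoc]

theorem pvProdDesc (n : Nat) : ∀ (m : Nat), m ≤ n →
    (∏ i ∈ Finset.range m, ((n : Int) - i)) = (n.descFactorial m : Int) := by
  intro m
  induction m with
  | zero => simp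
  | succ m ih =>
    intro h
    rw [Finset.prod_range_succ, ih (by omega), Nat.descFactorial_succ]
    push_cast [Nat.cast_sub (by omega : m ≤ n)]
    ring

theorem pvProdFact (m : Nat) : (∏ i ∈ Finset.range m, ((1 : Int) + i)) = (m.factorial : Int) := by
  induction m with
  | zero => simp
  | succ m ih =>
    rw [Finset.prod_range_succ, ih, Nat.factorial_succ]
    push_cast
    ring

theorem pvNumerEq (n m : Nat) (h : m ≤ n) :
    (PySem.List.pyRange (n : Int) ((n : Int) - (m : Int)) (-1)).foldl (· * ·) 1
      = (n.descFactorial m : Int) := by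
  rw [PySem.List.pyRange_neg_one]
  have ht : (((n : Int)) - ((n : Int) - (m : Int))).toNat = m := by omega
  rw [ht, List.foldl_map, pvFoldlMulRange (fun k => (n : Int) - k), pvProdDesc n m h]
  simp

theorem pvDenomEq (m : Nat) :
    (PySem.List.pyRange 1 ((m : Int) + 1) 1).foldl (· * ·) 1 = (m.factorial : Int) := by
  rw [PySem.List.pyRange_one]
  have ht : ((m : Int) + 1 - 1).toNat = m := by omega
  rw [ht, List.foldl_map, pvFoldlMulRange (fun k => (1 : Int) + k), pvProdFact m]
  simp

theorem pvNcrEq (n k : Nat) (h : k ≤ n) : ncr (n : Int) (k : Int) = (n.choose k : Int) := by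
  have hmin : min (k : Int) ((n : Int) - (k : Int)) = ((min k (n - k) : Nat) : Int) := by
    push_cast [Nat.cast_sub h]; omega
  unfold ncr
  simp only [hmin]
  rw [pvNumerEq n (min k (n - k)) (by omega), pvDenomEq (min k (n - k))]
  rw [PySem.Int.floordiv_natCast, ← Nat.choose_eq_descFactorial_div_factorial]
  rcases le_total k (n - k) with hle | hle
  · rw [min_eq_left hle]
  · rw [min_eq_right hle, Nat.choose_symm h]

theorem pvFallEq (L : Int) (k : Nat) :
    (PySem.List.pyRange 0 (k : Int) 1).foldl (fun p i => p * (L - i)) 1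
      = ∏ i ∈ Finset.range k, (L - i) := by
  rw [PySem.List.pyRange_zero_natCast, List.foldl_map, pvFoldlMulRange (fun i => L - i)]
  simp

theorem pvPowEq (a : Int) (k : Nat) :
    (PySem.List.pyRange 0 (k : Int) 1).foldl (fun p _ => p * a) 1 = a ^ k := by
  rw [PySem.List.pyRange_zero_natCast, List.foldl_map, pvFoldlMulRange (fun _ => a)]
  simp

-- A's obsidian loop computes the choose-times-falling-factorial sum
theorem pvObsA (N : Nat) (L : Int) : ∀ (m : Nat), m ≤ N →
    ((List.range m).map (fun (k : Nat) => (k : Int))).foldl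
      (fun acc j => acc +
        ((PySem.List.pyRange 0 j 1).foldl (fun p i => p * (L - i)) 1) * ncr (N : Int) j) 0
    = ∑ k ∈ Finset.range m, (∏ i ∈ Finset.range k, (L - i)) * (N.choose k : Int) := by
  intro m
  induction m with
  | zero => simp
  | succ m ih =>
    intro h
    rw [List.range_succ, List.map_append, List.foldl_append, ih (by omega)]
    simp only [List.map_cons, List.map_nil, List.foldl_cons, List.foldl_nil]
    rw [Finset.sum_range_succ, pvFallEq, pvNcrEq N m (by omega)]

-- the incremental binomial update step
theorem pvBinomStep (N m : Nat) (h : m ≤ N) :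
    PySem.Int.floordiv ((N.choose m : Int) * ((N : Int) - (m : Int))) ((m : Int) + 1)
      = (N.choose (m + 1) : Int) := by
  have hm : ((N : Int) - (m : Int)) = ((N - m : Nat) : Int) := by
    push_cast [Nat.cast_sub h]; ring
  rw [hm]
  have h1 : ((N.choose m : Int)) * ((N - m : Nat) : Int) = ((N.choose m * (N - m) : Nat) : Int) := by
    push_cast; ring
  have h2 : ((m : Int) + 1) = ((m + 1 : Nat) : Int) := by push_cast; ring
  rw [h1, h2, ← Nat.choose_succ_right_eq, PySem.Int.floordiv_natCast,
    Nat.mul_div_cancel _ (Nat.succ_pos m)]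

-- B's obsidian pass maintains (partial sum, C(N,m), falling-factorial product)
theorem pvObsB (N : Nat) (L : Int) : ∀ (m : Nat), m ≤ N →
    ((List.range m).map (fun (k : Nat) => (k : Int))).foldl
      (fun (s : Int × Int × Int) j =>
        (s.1 + s.2.1 * s.2.2,
         PySem.Int.floordiv (s.2.1 * ((N : Int) - j)) (j + 1),
         s.2.2 * (L - j))) (0, 1, 1)
    = (∑ k ∈ Finset.range m, (∏ i ∈ Finset.range k, (L - i)) * (N.choose k : Int),
       (N.choose m : Int), ∏ i ∈ Finset.range m, (L - i)) := by
  intro m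
  induction m with
  | zero => simp
  | succ m ih =>
    intro h
    rw [List.range_succ, List.map_append, List.foldl_append, ih (by omega)]
    simp only [List.map_cons, List.map_nil, List.foldl_cons, List.foldl_nil]
    refine Prod.ext ?_ (Prod.ext ?_ ?_)
    · simp [Finset.sum_range_succ, mul_comm]
    · exact pvBinomStep N m (by omega)
    · show (∏ i ∈ Finset.range m, (L - i)) * (L - (m : Int)) = ∏ i ∈ Finset.range (m + 1), (L - i)
      rw [Finset.prod_range_succ]

-- A's inner per-item loop
theorem pvItemA (N : Nat) (a : Int) : ∀ (m : Nat), m ≤ N →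
    ((List.range m).map (fun (k : Nat) => (k : Int))).foldl
      (fun acc j => acc + ncr (N : Int) j *
        ((PySem.List.pyRange 0 j 1).foldl (fun p _ => p * a) 1)) 0
    = ∑ k ∈ Finset.range m, (N.choose k : Int) * a ^ k := by
  intro m
  induction m with
  | zero => simp
  | succ m ih =>
    intro h
    rw [List.range_succ, List.map_append, List.foldl_append, ih (by omega)]
    simp only [List.map_cons, List.map_nil, List.foldl_cons, List.foldl_nil]
    rw [Finset.sum_range_succ, pvPowEq, pvNcrEq N m (by omega)]

-- B's inner per-item pass maintains (partial sum, C(N,m), a^m)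
theorem pvItemB (N : Nat) (a : Int) : ∀ (m : Nat), m ≤ N →
    ((List.range m).map (fun (k : Nat) => (k : Int))).foldl
      (fun (s : Int × Int × Int) j =>
        (s.1 + s.2.1 * s.2.2,
         PySem.Int.floordiv (s.2.1 * ((N : Int) - j)) (j + 1),
         s.2.2 * a)) (0, 1, 1)
    = (∑ k ∈ Finset.range m, (N.choose k : Int) * a ^ k, (N.choose m : Int), a ^ m) := by
  intro m
  induction m with
  | zero => simp
  | succ m ih =>
    intro h
    rw [List.range_succ, List.map_append, List.foldl_append, ih (by omega)]
    simp only [List.map_cons, List.map_nil, List.foldl_cons, List.foldl_nil]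
    refine Prod.ext ?_ (Prod.ext ?_ ?_)
    · simp [Finset.sum_range_succ]
    · exact pvBinomStep N m (by omega)
    · show a ^ m * a = a ^ (m + 1)
      rw [pow_succ]

-- two extensionally equal fold bodies give the same fold
theorem pvFoldlExt {α β : Type} (f g : α → β → α) (h : ∀ x y, f x y = g x y) :
    ∀ (l : List β) (init : α), l.foldl f init = l.foldl g init := by
  intro l
  induction l with
  | nil => intro init; rfl
  | cons x xs ih => intro init; rw [List.foldl_cons, List.foldl_cons, h, ih]

-- the two per-item fold bodies agree on every state and count
theorem pvItemBody (a : Int) (st c : Int) :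
    (if c = 0 then st
     else st * ((PySem.List.pyRange 0 c 1).foldl
       (fun acc k => acc + ncr c k *
         ((PySem.List.pyRange 0 k 1).foldl (fun p _ => p * a) 1)) 0))
    = (if c = 0 then st
       else st * ((PySem.List.pyRange 0 c 1).foldl
         (fun (s : Int × Int × Int) k =>
           (s.1 + s.2.1 * s.2.2,
            PySem.Int.floordiv (s.2.1 * (c - k)) (k + 1),
            s.2.2 * a)) (0, 1, 1)).1) := by
  rcases lt_trichotomy c 0 with hc | hc | hc
  · rw [if_neg (by omega), if_neg (by omega), PySem.List.pyRange_one_eq_nil (by omega)]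
    simp
  · simp [hc]
  · rw [if_neg (by omega), if_neg (by omega)]
    obtain ⟨M, rfl⟩ : ∃ M : Nat, c = (M : Int) := ⟨c.toNat, by omega⟩
    rw [PySem.List.pyRange_zero_natCast, pvItemA M a M (le_refl _), pvItemB M a M (le_refl _)]

-- the obsidian folds of the two ports agree
theorem pvObsEq (N L : Int) :
    (PySem.List.pyRange 0 N 1).foldl
      (fun acc j => acc +
        ((PySem.List.pyRange 0 j 1).foldl (fun p i => p * (L - i)) 1) * ncr N j) 0
    = ((PySem.List.pyRange 0 N 1).foldl
        (fun (s : Int × Int × Int) j =>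
          (s.1 + s.2.1 * s.2.2,
           PySem.Int.floordiv (s.2.1 * (N - j)) (j + 1),
           s.2.2 * (L - j))) (0, 1, 1)).1 := by
  rcases (by omega : N ≤ 0 ∨ 0 < N) with hN | hN
  · rw [PySem.List.pyRange_one_eq_nil hN]
    simp
  · obtain ⟨M, rfl⟩ : ∃ M : Nat, N = (M : Int) := ⟨N.toNat, by omega⟩
    rw [PySem.List.pyRange_zero_natCast, pvObsA M L M (le_refl _), pvObsB M L M (le_refl _)]

-- ===== VERDICT (by name: the statement is the Claim_ definition above) =====
theorem underestimate_state_space_spec : Claim_equal_underestimate_state_space := by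
  intro x_min x_max y_min y_max z_min z_max n_obsidian_total item_counts _
  show _ = _
  unfold underestimate_state_space underestimate_state_space_alt
  simp only []
  rw [pvObsEq n_obsidian_total ((x_max - x_min + 1) * (y_max - y_min + 1) * (z_max - z_min + 1))]
  congr 2
  exact pvFoldlExt _ _
    (fun st c => pvItemBody
      ((x_max - x_min + 1) * (y_max - y_min + 1) * (z_max - z_min + 1) - n_obsidian_total) st c)
    item_counts 1
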